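-- pv_equiv track=rewrite | github.com/MaxOfLondon/yt-transcriptor | yt-transcriptor.py | find_sentence_end
-- ===== SOURCE A (Python) =====
-- TERMINATORS = ['.', '!', '?']
--
-- def find_sentence_end(paragraph):
--     possible_endings = []
--     sentence_terminators = TERMINATORS
--     for sentence_terminator in sentence_terminators:
--         t_indices = list(find_all(paragraph, sentence_terminator))
--         possible_endings.extend(
--             ([] if not len(t_indices)
--                 else [[i, len(sentence_terminator)] for i in t_indices]))
--     if len(paragraph) in [pe[0] + pe[1] for pe in possible_endings]:
--         max_end_start = max([pe[0] for pe in possible_endings])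
--         possible_endings = \
--             [pe for pe in possible_endings
--                 if pe[0] != max_end_start]
--     possible_endings = \
--         [pe[0] + pe[1] for pe in possible_endings
--             if sum(pe) > len(paragraph)
--             or (sum(pe) < len(paragraph)
--                 and paragraph[sum(pe)] == ' ')]
--     end = (-1 if not len(possible_endings) else max(possible_endings))
--     return end
--
-- def find_all(a_str, sub):
--     start = 0
--     while True:
--         start = a_str.find(sub, start)
--         if start == -1:
--             return
--         yield start
--         start += len(sub)
-- ===== SOURCE B (Python) =====
-- TERMINATORS = ['.', '!', '?']
--
-- def find_sentence_end(paragraph):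
--     # Single right-to-left scan: the answer is the last index i with a
--     # terminator at i followed by a space; return i+1, or -1 if none.
--     for i in range(len(paragraph) - 2, -1, -1):
--         if paragraph[i] in TERMINATORS and paragraph[i + 1] == ' ':
--             return i + 1
--     return -1
-- ===== Notes on version B (the rewrite author's own statement) =====
-- stated objective: simpler
-- what changed: Replaced the per-terminator index-list building, pair lists, max-index trailing-removal branch (a no-op, since those endings fail the space filter anyway) and final max() with one right-to-left scan that returns i+1 at the first terminator-followed-by-space.
import Mathlib
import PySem

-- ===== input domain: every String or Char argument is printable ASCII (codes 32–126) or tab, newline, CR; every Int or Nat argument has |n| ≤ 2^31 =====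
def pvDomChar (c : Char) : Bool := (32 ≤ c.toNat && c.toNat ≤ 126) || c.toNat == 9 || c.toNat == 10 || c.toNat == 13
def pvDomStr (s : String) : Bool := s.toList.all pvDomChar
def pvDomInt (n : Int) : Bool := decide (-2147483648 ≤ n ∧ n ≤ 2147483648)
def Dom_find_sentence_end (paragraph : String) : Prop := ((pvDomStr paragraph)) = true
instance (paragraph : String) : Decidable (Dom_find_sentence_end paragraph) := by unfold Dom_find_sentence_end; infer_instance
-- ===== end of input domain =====

-- B replaces A's per-terminator index lists, pair lists, trailing-removal branch and final max()
-- by a single right-to-left scan returning i+1 at the first terminator followed by a space (simpler).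

-- ===== PORT A =====

-- TERMINATORS = ['.', '!', '?']
def pvTERMINATORS : List (List Char) := [['.'], ['!'], ['?']]

-- find_all(a_str, sub): repeated a_str.find(sub, start); the generator's yields collected as a list.
-- The while-loop is run on fuel (a_str.length + 1 steps suffice for every call A makes, where sub
-- is one character); fuel only makes the same computation total.
def pvFindAllGo (a_str sub : List Char) (fuel : Nat) (start : Nat) : List Int :=
  match fuel with
  | 0 => []
  | fuel + 1 =>
    let r := PySem.Chars.findFrom a_str sub (start : Int)
    if r = -1 then []
    else r :: pvFindAllGo a_str sub fuel (r.toNat + sub.length)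

def pvFindAll (a_str sub : List Char) : List Int :=
  pvFindAllGo a_str sub (a_str.length + 1) 0

-- Python's two-element lists [i, len(sentence_terminator)] are ported as pairs.
-- first assignment + loop: possible_endings.extend(...)
def pvPossibleEndings1 (cs : List Char) : List (Int × Int) :=
  pvTERMINATORS.foldl
    (fun acc sentence_terminator =>
      let t_indices := pvFindAll cs sentence_terminator
      acc ++ (if t_indices.length = 0 then []
              else t_indices.map (fun i => (i, (sentence_terminator.length : Int)))))
    []

-- the 'if len(paragraph) in [...]' trailing-removal reassignment
def pvPossibleEndings2 (cs : List Char) : List (Int × Int) :=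
  let possible_endings := pvPossibleEndings1 cs
  if (cs.length : Int) ∈ possible_endings.map (fun pe => pe.1 + pe.2) then
    match PySem.List.max? (possible_endings.map (fun pe => pe.1)) (fun x => x) with
    | some max_end_start => possible_endings.filter (fun pe => pe.1 ≠ max_end_start)
    | none => possible_endings   -- unreachable: the list is nonempty under the membership guard
  else possible_endings

-- the filter + sum reassignment ('sum(pe)' = pe.1 + pe.2; paragraph[sum(pe)] is in range
-- whenever the 'sum(pe) < len(paragraph)' conjunct before it holds, so pyGetD is exact here)
-- the filter predicate of pvPossibleEndings3
def pvPred (cs : List Char) (pe : Int × Int) : Bool :=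
  (decide (pe.1 + pe.2 > (cs.length : Int))) ||
  ((decide (pe.1 + pe.2 < (cs.length : Int))) &&
   (PySem.List.pyGetD cs (pe.1 + pe.2) ' ' == ' '))

def pvPossibleEndings3 (cs : List Char) : List Int :=
  ((pvPossibleEndings2 cs).filter (pvPred cs)).map (fun pe => pe.1 + pe.2)

def find_sentence_end (paragraph : String) : Int :=
  let possible_endings := pvPossibleEndings3 paragraph.toList
  if possible_endings.length = 0 then -1
  else match PySem.List.max? possible_endings (fun x => x) with
       | some m => m
       | none => -1   -- unreachable: the list is nonempty in this branch

-- ===== PORT B =====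

-- 'for i in range(len(paragraph)-2, -1, -1)': pvAltGo cs (j+1) handles loop index i = j
def pvAltGo (cs : List Char) : Nat → Int
  | 0 => -1
  | j + 1 =>
    if (decide (cs.getD j ' ' ∈ (['.', '!', '?'] : List Char))) && (cs.getD (j + 1) 'x' == ' ')
    then ((j : Int) + 1)
    else pvAltGo cs j

def find_sentence_end_alt (paragraph : String) : Int :=
  pvAltGo paragraph.toList (paragraph.toList.length - 1)

-- ===== PRECONDITION & SPEC =====
def Spec_find_sentence_end (paragraph : String) (out : Int) : Prop := out = find_sentence_end_alt paragraph
instance (paragraph : String) (out : Int) : Decidable (Spec_find_sentence_end paragraph out) := by unfold Spec_find_sentence_end; infer_instance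

-- ===== CLAIM (what is proved, stated in full; the proofs are below) =====
def Claim_equal_find_sentence_end : Prop := ∀ (paragraph : String), Dom_find_sentence_end paragraph → Spec_find_sentence_end paragraph (find_sentence_end paragraph)

-- ===== LEMMAS AND PROOFS =====

-- a valid sentence end at index j: a terminator at j, a space right after
def pvValid (cs : List Char) (j : Nat) : Prop :=
  (cs[j]? = some '.' ∨ cs[j]? = some '!' ∨ cs[j]? = some '?') ∧ cs[j + 1]? = some ' '

theorem pvValid_lt {cs : List Char} {j : Nat} (h : pvValid cs j) : j + 1 < cs.length := by
  obtain ⟨hlt, -⟩ := List.getElem?_eq_some_iff.mp h.2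
  exact hlt

theorem pvSingleton_prefix_iff {c : Char} {l : List Char} :
    [c] <+: l ↔ l.head? = some c := by
  cases l with
  | nil => simp
  | cons a t =>
    constructor
    · rintro ⟨u, hu⟩; simp at hu; simp [hu.1]
    · intro h; simp at h; exact ⟨t, by simp [h]⟩

theorem pvDrop_suffix_drop {cs : List Char} {s j : Nat} (h : s ≤ j) :
    cs.drop j <:+ cs.drop s := by
  have h2 : cs.drop j = (cs.drop s).drop (j - s) := by
    rw [List.drop_drop]; congr 1; omega
  rw [h2]; exact List.drop_suffix _ _

theorem pvMem_findAllGo {cs : List Char} {c : Char} {x : Int} :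
    ∀ (fuel start : Nat), start ≤ cs.length → cs.length + 1 ≤ fuel + start →
    (x ∈ pvFindAllGo cs [c] fuel start ↔
      ∃ j : Nat, start ≤ j ∧ cs[j]? = some c ∧ x = (j : Int)) := by
  intro fuel
  induction fuel with
  | zero => intro start h1 h2; omega
  | succ fuel ih =>
    intro start h1 h2
    simp only [pvFindAllGo]
    set r := PySem.Chars.findFrom cs [c] (start : Int) with hr
    by_cases hneg : r = -1
    · rw [if_pos hneg]
      have hno : ¬ ([c] <:+: cs.drop start) :=
        (PySem.Chars.findFrom_natCast_eq_neg_one_iff cs [c] start h1).mp hneg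
      simp only [List.not_mem_nil, false_iff]
      rintro ⟨j, hsj, hj, rfl⟩
      apply hno
      have hp : [c] <+: cs.drop j :=
        pvSingleton_prefix_iff.mpr (by rw [List.head?_drop]; exact hj)
      exact hp.isInfix.trans (pvDrop_suffix_drop hsj).isInfix
    · have hspec := PySem.Chars.findFrom_natCast_spec cs [c] start h1 hneg
      obtain ⟨hge, hpre, hfirst⟩ := hspec
      have hrn : 0 ≤ r := le_trans (by exact_mod_cast Nat.zero_le start) hge
      have hchar : cs[r.toNat]? = some c := by
        rw [← List.head?_drop]; exact pvSingleton_prefix_iff.mp hpre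
      have hlt : r.toNat < cs.length := by
        obtain ⟨h, -⟩ := List.getElem?_eq_some_iff.mp hchar
        exact h
      have hstart_le : start ≤ r.toNat := by omega
      rw [if_neg hneg]
      simp only [List.mem_cons, List.length_cons, List.length_nil]
      rw [ih (r.toNat + (0 + 1)) (by omega) (by omega)]
      constructor
      · rintro (rfl | ⟨j, hj1, hj2, rfl⟩)
        · exact ⟨r.toNat, hstart_le, hchar, by omega⟩
        · exact ⟨j, by omega, hj2, rfl⟩
      · rintro ⟨j, hsj, hj, rfl⟩
        by_cases hje : j = r.toNat
        · left; subst hje; omega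
        · right
          refine ⟨j, ?_, hj, rfl⟩
          by_contra hlt'
          have hjlt : j < r.toNat := by omega
          exact hfirst j hsj hjlt (pvSingleton_prefix_iff.mpr (by rw [List.head?_drop]; exact hj))

theorem pvMem_findAll {cs : List Char} {c : Char} {x : Int} :
    x ∈ pvFindAll cs [c] ↔ ∃ j : Nat, cs[j]? = some c ∧ x = (j : Int) := by
  rw [pvFindAll, pvMem_findAllGo (cs.length + 1) 0 (by omega) (by omega)]
  simp

theorem pvIfLenMap {l : List Int} {f : Int → Int × Int} :
    (if l.length = 0 then ([] : List (Int × Int)) else l.map f) = l.map f := by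
  cases l <;> simp

-- membership in A's possible_endings after the extend loop
theorem pvMem_PE1 {cs : List Char} {pe : Int × Int} :
    pe ∈ pvPossibleEndings1 cs ↔
      ∃ j : Nat, (cs[j]? = some '.' ∨ cs[j]? = some '!' ∨ cs[j]? = some '?') ∧
        pe = ((j : Int), 1) := by
  simp only [pvPossibleEndings1, pvTERMINATORS, List.foldl_cons, List.foldl_nil,
    pvIfLenMap, List.nil_append]
  simp only [List.mem_append, List.mem_map, List.length_cons, List.length_nil]
  constructor
  · rintro ((⟨x, hx, rfl⟩ | ⟨x, hx, rfl⟩) | ⟨x, hx, rfl⟩) <;>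
      [obtain ⟨j, hj, rfl⟩ := pvMem_findAll.mp hx;
       obtain ⟨j, hj, rfl⟩ := pvMem_findAll.mp hx;
       obtain ⟨j, hj, rfl⟩ := pvMem_findAll.mp hx]
    · exact ⟨j, Or.inl hj, rfl⟩
    · exact ⟨j, Or.inr (Or.inl hj), rfl⟩
    · exact ⟨j, Or.inr (Or.inr hj), rfl⟩
  · rintro ⟨j, (hj | hj | hj), rfl⟩
    · exact Or.inl (Or.inl ⟨(j : Int), pvMem_findAll.mpr ⟨j, hj, rfl⟩, rfl⟩)
    · exact Or.inl (Or.inr ⟨(j : Int), pvMem_findAll.mpr ⟨j, hj, rfl⟩, rfl⟩)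
    · exact Or.inr ⟨(j : Int), pvMem_findAll.mpr ⟨j, hj, rfl⟩, rfl⟩

-- a pair of the shape (j, 1) with j an index passes the filter iff j is a valid sentence end
theorem pvPred_iff {cs : List Char} {j : Nat} (hj : j < cs.length) :
    pvPred cs ((j : Int), 1) = true ↔ cs[j + 1]? = some ' ' := by
  have hc : ((j : Int) + 1) = ((j + 1 : Nat) : Int) := by push_cast; ring
  unfold pvPred
  simp only [hc, PySem.List.pyGetD_natCast]
  simp only [Bool.or_eq_true, Bool.and_eq_true, decide_eq_true_eq, beq_iff_eq]
  constructor
  · rintro (h | ⟨h1, h2⟩)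
    · exfalso
      have h' : cs.length < j + 1 := by exact_mod_cast h
      omega
    · have hlt : j + 1 < cs.length := by exact_mod_cast h1
      rw [List.getD_eq_getElem cs ' ' hlt] at h2
      rw [List.getElem?_eq_getElem hlt, h2]
  · intro h
    obtain ⟨hlt, hv⟩ := List.getElem?_eq_some_iff.mp h
    right
    exact ⟨by exact_mod_cast hlt, by rw [List.getD_eq_getElem cs ' ' hlt]; exact hv⟩

-- membership in A's final list of candidate ends: exactly {j+1 | j a valid sentence end}
-- every element of possible_endings is (j, 1) for an in-range index j
theorem pvShape_PE1 {cs : List Char} {pe : Int × Int} (h : pe ∈ pvPossibleEndings1 cs) :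
    ∃ j : Nat, j < cs.length ∧ pe = ((j : Int), 1) := by
  obtain ⟨j, hj, rfl⟩ := pvMem_PE1.mp h
  refine ⟨j, ?_, rfl⟩
  rcases hj with h | h | h <;> exact (List.getElem?_eq_some_iff.mp h).1

-- the trailing-removal branch never removes an element that passes the space filter
theorem pvFilter_PE2 {cs : List Char} {pe : Int × Int} :
    pe ∈ pvPossibleEndings2 cs ∧ pvPred cs pe = true ↔
    pe ∈ pvPossibleEndings1 cs ∧ pvPred cs pe = true := by
  unfold pvPossibleEndings2
  dsimp only
  split
  case isFalse => exact Iff.rfl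
  case isTrue hmem_n =>
    obtain ⟨pe0, hpe0, hsum0⟩ := List.mem_map.mp hmem_n
    rcases hmax : PySem.List.max? ((pvPossibleEndings1 cs).map (fun pe => pe.1)) (fun x => x) with
      _ | m
    · simp only [hmax]
    · simp only [hmax, List.mem_filter, decide_eq_true_eq]
      constructor
      · rintro ⟨⟨h1, -⟩, h2⟩; exact ⟨h1, h2⟩
      · rintro ⟨h1, h2⟩
        refine ⟨⟨h1, ?_⟩, h2⟩
        -- m is the maximal index n-1 (some terminator ends the paragraph);
        -- but pe passes the space filter, so pe.1 + 1 < n, hence pe.1 ≠ m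
        obtain ⟨j0, hj0lt, rfl⟩ := pvShape_PE1 hpe0
        have hj0 : (j0 : Int) = (cs.length : Int) - 1 := by
          simp only at hsum0; omega
        have hmle : (j0 : Int) ≤ m :=
          PySem.List.max?_isMax hmax _ (List.mem_map.mpr ⟨_, hpe0, rfl⟩)
        obtain ⟨pe', hpe', hpe'1⟩ := List.mem_map.mp (PySem.List.max?_mem hmax)
        obtain ⟨j', hj'lt, rfl⟩ := pvShape_PE1 hpe'
        have hm : m = (cs.length : Int) - 1 := by
          simp only at hpe'1; omega
        obtain ⟨j, hjlt, rfl⟩ := pvShape_PE1 h1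
        have hsp := (pvPred_iff hjlt).mp h2
        have hlt' : j + 1 < cs.length := (List.getElem?_eq_some_iff.mp hsp).1
        simp only
        omega

-- an element of possible_endings passes the filter iff its index is a valid sentence end
theorem pvPE1_pred {cs : List Char} {pe : Int × Int} :
    pe ∈ pvPossibleEndings1 cs ∧ pvPred cs pe = true ↔
    ∃ j : Nat, pvValid cs j ∧ pe = ((j : Int), 1) := by
  constructor
  · rintro ⟨h1, h2⟩
    obtain ⟨j, hj, rfl⟩ := pvMem_PE1.mp h1
    have hjlt : j < cs.length := by
      rcases hj with h | h | h <;> exact (List.getElem?_eq_some_iff.mp h).1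
    exact ⟨j, ⟨hj, (pvPred_iff hjlt).mp h2⟩, rfl⟩
  · rintro ⟨j, ⟨hterm, hsp⟩, rfl⟩
    have hjlt : j < cs.length := by
      rcases hterm with h | h | h <;> exact (List.getElem?_eq_some_iff.mp h).1
    exact ⟨pvMem_PE1.mpr ⟨j, hterm, rfl⟩, (pvPred_iff hjlt).mpr hsp⟩

theorem pvMem_PE3 {cs : List Char} {x : Int} :
    x ∈ pvPossibleEndings3 cs ↔ ∃ j : Nat, pvValid cs j ∧ x = (j : Int) + 1 := by
  unfold pvPossibleEndings3
  simp only [List.mem_map, List.mem_filter]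
  constructor
  · rintro ⟨pe, ⟨h1, h2⟩, rfl⟩
    obtain ⟨j, hvj, rfl⟩ := pvPE1_pred.mp (pvFilter_PE2.mp ⟨h1, h2⟩)
    exact ⟨j, hvj, rfl⟩
  · rintro ⟨j, hvj, rfl⟩
    obtain ⟨h1, h2⟩ := pvFilter_PE2.mpr (pvPE1_pred.mpr ⟨j, hvj, rfl⟩)
    exact ⟨((j : Int), 1), ⟨h1, h2⟩, rfl⟩

theorem pvAltGo_spec (cs : List Char) (i : Nat) :
    (pvAltGo cs i = -1 ∧ ∀ j < i, ¬ pvValid cs j) ∨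
    (∃ j < i, pvValid cs j ∧ pvAltGo cs i = (j : Int) + 1 ∧ ∀ j' < i, pvValid cs j' → j' ≤ j) := by
  induction i with
  | zero => left; exact ⟨rfl, by omega⟩
  | succ j ih =>
    by_cases hv : pvValid cs j
    · right
      refine ⟨j, by omega, hv, ?_, by omega⟩
      have hlen := pvValid_lt hv
      have hjlt : j < cs.length := by omega
      have h1 : cs.getD j ' ' ∈ (['.', '!', '?'] : List Char) := by
        rw [List.getD_eq_getElem cs ' ' hjlt]
        rcases hv.1 with h | h | h <;>
          rw [List.getElem?_eq_getElem hjlt] at h <;>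
          simp at h <;> simp [h]
      have h2 : cs.getD (j + 1) 'x' = ' ' := by
        rw [List.getD_eq_getElem cs 'x' hlen]
        have hv2 := hv.2
        rw [List.getElem?_eq_getElem hlen] at hv2
        exact Option.some.inj hv2
      simp only [pvAltGo]
      rw [if_pos (by simp only [Bool.and_eq_true, decide_eq_true_eq, beq_iff_eq]; exact ⟨h1, h2⟩)]
    · have hgo : pvAltGo cs (j + 1) = pvAltGo cs j := by
        simp only [pvAltGo]
        rw [if_neg]
        intro hcond
        simp only [Bool.and_eq_true, decide_eq_true_eq, beq_iff_eq] at hcond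
        apply hv
        by_cases hlen : j + 1 < cs.length
        · have hjlt : j < cs.length := by omega
          have hgd : cs.getD j ' ' = cs[j] := List.getD_eq_getElem cs ' ' hjlt
          have hmem := hcond.1
          simp only [List.mem_cons, List.not_mem_nil, or_false] at hmem
          constructor
          · rcases hmem with h | h | h <;> simp only [hgd] at h
            · left; rw [List.getElem?_eq_getElem hjlt, h]
            · right; left; rw [List.getElem?_eq_getElem hjlt, h]
            · right; right; rw [List.getElem?_eq_getElem hjlt, h]
          · rw [List.getElem?_eq_getElem hlen, ← List.getD_eq_getElem cs 'x' hlen, hcond.2]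
        · exfalso
          have hd : cs.getD (j + 1) 'x' = 'x' := List.getD_eq_default _ _ (by omega)
          rw [hcond.2] at hd; exact absurd hd (by decide)
      rw [hgo]
      rcases ih with ⟨he, hnone⟩ | ⟨j0, hj0, hv0, heq, hmax⟩
      · left
        refine ⟨he, ?_⟩
        intro j' hj' hvj'
        rcases Nat.lt_succ_iff_lt_or_eq.mp hj' with h | rfl
        · exact hnone j' h hvj'
        · exact hv hvj'
      · right
        refine ⟨j0, by omega, hv0, heq, ?_⟩
        intro j' hj' hvj'
        rcases Nat.lt_succ_iff_lt_or_eq.mp hj' with h | rfl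
        · exact hmax j' h hvj'
        · exact absurd hvj' hv

-- ===== VERDICT (by name: the statement is the Claim_ definition above) =====
theorem find_sentence_end_spec : Claim_equal_find_sentence_end := by
  intro paragraph _
  show find_sentence_end paragraph = find_sentence_end_alt paragraph
  set cs := paragraph.toList with hcs
  rcases pvAltGo_spec cs (cs.length - 1) with ⟨hB, hnone⟩ | ⟨j0, hj0, hv0, hBeq, hmax⟩
  · -- no valid sentence end: both sides are -1
    have hF : pvPossibleEndings3 cs = [] := by
      rw [List.eq_nil_iff_forall_not_mem]
      intro x hx
      obtain ⟨j, hvj, rfl⟩ := pvMem_PE3.mp hx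
      exact hnone j (by have := pvValid_lt hvj; omega) hvj
    rw [find_sentence_end, find_sentence_end_alt]
    rw [← hcs, hF, hB]
    rfl
  · -- the greatest valid j0 wins on both sides
    have hmem : (j0 : Int) + 1 ∈ pvPossibleEndings3 cs := pvMem_PE3.mpr ⟨j0, hv0, rfl⟩
    have hne : pvPossibleEndings3 cs ≠ [] := fun h => by simp [h] at hmem
    rw [find_sentence_end, find_sentence_end_alt, ← hcs, hBeq]
    have hlen0 : ¬ ((pvPossibleEndings3 cs).length = 0) := by
      simpa [List.length_eq_zero_iff] using hne
    rw [if_neg hlen0]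
    rcases hsome : PySem.List.max? (pvPossibleEndings3 cs) (fun x => x) with _ | m
    · exact absurd ((PySem.List.max?_eq_none_iff _ _).mp hsome) hne
    · obtain ⟨j1, hv1, rfl⟩ := pvMem_PE3.mp (PySem.List.max?_mem hsome)
      have h1 : (j0 : Int) + 1 ≤ (j1 : Int) + 1 := PySem.List.max?_isMax hsome _ hmem
      have h2 : j1 ≤ j0 := hmax j1 (by have := pvValid_lt hv1; omega) hv1
      have : j0 = j1 := by omega
      subst this; rfl
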